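-- pv_equiv track=rewrite | github.com/alisajedi/bug-triager-scikit | dumpbayes.py | topn
-- ===== SOURCE A (Python) =====
-- def topn(resrow, correct,names,n=5):
--     namet = [(val,names[i]) for i, val in enumerate(resrow)]
--     namet.sort()
--     namet.reverse()
--     l = [x[1] for x in namet]
--     try:
--         return l.index(correct) + 1 <= n
--     except ValueError:
--         return False
-- ===== SOURCE B (Python) =====
-- def topn(resrow, correct, names, n=5):
--     # single pass: best score attached to `correct`, then count who ranks strictly ahead
--     best = None
--     for v, name in zip(resrow, names):
--         if name == correct and (best is None or v > best):
--             best = v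
--     if best is None:
--         return False
--     ahead = 0
--     for v, name in zip(resrow, names):
--         if v > best or (v == best and name > correct):
--             ahead += 1
--     return ahead + 1 <= n
-- ===== Notes on version B (the rewrite author's own statement) =====
-- stated objective: faster
-- what changed: Instead of building the (value,name) tuple list, sorting it, reversing and scanning for the first index of `correct`, B makes one pass to find the best value attached to `correct` and one pass to count entries strictly greater in tuple order; rank = count of strictly greater tuples.
import Mathlib
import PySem

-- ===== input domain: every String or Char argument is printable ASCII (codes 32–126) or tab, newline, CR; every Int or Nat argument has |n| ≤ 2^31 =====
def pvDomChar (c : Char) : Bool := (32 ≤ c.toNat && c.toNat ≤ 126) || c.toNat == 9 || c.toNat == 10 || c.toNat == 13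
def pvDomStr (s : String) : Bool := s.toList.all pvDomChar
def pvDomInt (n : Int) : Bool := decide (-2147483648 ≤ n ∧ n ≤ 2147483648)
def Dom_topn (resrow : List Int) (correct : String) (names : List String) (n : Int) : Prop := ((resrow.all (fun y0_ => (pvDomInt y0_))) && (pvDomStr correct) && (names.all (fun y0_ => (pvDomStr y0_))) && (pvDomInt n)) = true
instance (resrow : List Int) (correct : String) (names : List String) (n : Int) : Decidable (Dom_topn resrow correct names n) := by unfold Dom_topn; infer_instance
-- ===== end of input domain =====

-- B replaces A's sort+reverse+index by two linear passes (best value attached to `correct`,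
-- then a count of the tuples strictly greater in Python tuple order); return values proved equal.
-- String comparison is ported on .toList (code-point lexicographic = Python's on the ASCII domain).

-- ===== PORT A =====
def topn (resrow : List Int) (correct : String) (names : List String) (n : Int) : Bool :=
  -- namet = [(val, names[i]) for i, val in enumerate(resrow)]
  let namet := (PySem.List.enumerate resrow).map (fun p => (p.2, PySem.List.pyGetD names p.1 ""))
  -- namet.sort(); namet.reverse()  (tuple order: value first, then name)
  let srt := PySem.List.sorted2 namet (fun x => x.1) (fun x => x.2.toList)
  let rev := srt.reverse
  -- l = [x[1] for x in namet]
  let l := rev.map (fun x => x.2)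
  -- return l.index(correct) + 1 <= n   (ValueError -> False)
  match PySem.List.index? l correct with
  | some i => decide ((i : Int) + 1 ≤ n)
  | none => false

-- ===== PORT B =====
def topn_alt (resrow : List Int) (correct : String) (names : List String) (n : Int) : Bool :=
  let pairs := resrow.zip names
  -- best = None; for v, name in zip(resrow, names): if name == correct and (best is None or v > best): best = v
  let best : Option Int := pairs.foldl
    (fun best p =>
      if p.2 == correct && (match best with | none => true | some bv => decide (bv < p.1))
      then some p.1 else best) none
  match best with
  | none => false
  | some b =>
    -- ahead = number of tuples strictly greater than (best, correct) in tuple order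
    let ahead := pairs.countP (fun p => decide (b < p.1 ∨ (p.1 = b ∧ correct.toList < p.2.toList)))
    decide ((ahead : Int) + 1 ≤ n)

-- ===== PRECONDITION & SPEC =====
-- A indexes names[i] for every i < len(resrow): it raises IndexError when names is shorter.
def Pre_topn (resrow : List Int) (correct : String) (names : List String) (n : Int) : Prop :=
  resrow.length ≤ names.length
instance (resrow : List Int) (correct : String) (names : List String) (n : Int) : Decidable (Pre_topn resrow correct names n) := by unfold Pre_topn; infer_instance
def pvWitness_topn : List Int × String × List String × Int := ([3, 1], "a", ["a", "b"], 1)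

def Spec_topn (resrow : List Int) (correct : String) (names : List String) (n : Int) (out : Bool) : Prop := out = topn_alt resrow correct names n
instance (resrow : List Int) (correct : String) (names : List String) (n : Int) (out : Bool) : Decidable (Spec_topn resrow correct names n out) := by unfold Spec_topn; infer_instance

-- ===== CLAIM (what is proved, stated in full; the proofs are below) =====
def Claim_equal_topn : Prop := ∀ (resrow : List Int) (correct : String) (names : List String) (n : Int), Dom_topn resrow correct names n → Pre_topn resrow correct names n → Spec_topn resrow correct names n (topn resrow correct names n)

-- ===== LEMMAS AND PROOFS =====

-- Python's tuple-< on (value, name), exactly the `before` test sorted2 uses in `topn`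
def lexB (p q : Int × String) : Bool :=
  decide (p.1 < q.1) || (!decide (q.1 < p.1) && decide (p.2.toList < q.2.toList))

theorem lexB_iff (p q : Int × String) :
    lexB p q = true ↔ p.1 < q.1 ∨ (p.1 = q.1 ∧ p.2.toList < q.2.toList) := by
  unfold lexB
  by_cases h1 : p.1 < q.1
  · simp [h1]
  · by_cases h2 : q.1 < p.1
    · simp [h1, h2]
      intro h; omega
    · have h3 : p.1 = q.1 := by omega
      simp [h3]

theorem sorted2_eq_foldl (xs : List (Int × String)) :
    PySem.List.sorted2 xs (fun x => x.1) (fun x => x.2.toList) =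
      xs.foldl (fun acc x => PySem.List.insertBy lexB x acc) [] := rfl

theorem lexB_asymm {p q : Int × String} (h : lexB p q = true) : lexB q p = false := by
  rw [lexB_iff] at h
  by_contra hc
  rw [Bool.not_eq_false, lexB_iff] at hc
  rcases h with h | ⟨h1, h2⟩ <;> rcases hc with hc | ⟨hc1, hc2⟩
  · omega
  · omega
  · omega
  · exact absurd (lt_trans h2 hc2) (lt_irrefl _)

theorem lexB_trans {p q r : Int × String} (h1 : lexB p q = true) (h2 : lexB q r = true) :
    lexB p r = true := by
  rw [lexB_iff] at h1 h2 ⊢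
  rcases h1 with h1 | ⟨h1a, h1b⟩ <;> rcases h2 with h2 | ⟨h2a, h2b⟩
  · exact Or.inl (lt_trans h1 h2)
  · exact Or.inl (by omega)
  · exact Or.inl (by omega)
  · exact Or.inr ⟨by omega, lt_trans h1b h2b⟩

-- insertion keeps the "ascending in tuple order" invariant
theorem pairwise_insertBy (x : Int × String) (ys : List (Int × String))
    (h : ys.Pairwise (fun a b => lexB b a = false)) :
    (PySem.List.insertBy lexB x ys).Pairwise (fun a b => lexB b a = false) := by
  induction ys with
  | nil => simp [PySem.List.insertBy]
  | cons y ys ih =>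
    rw [List.pairwise_cons] at h
    by_cases hxy : lexB x y = true
    · simp only [PySem.List.insertBy, hxy, if_pos]
      refine List.Pairwise.cons ?_ (List.Pairwise.cons h.1 h.2)
      intro z hz
      rcases List.mem_cons.mp hz with rfl | hz'
      · exact lexB_asymm hxy
      · have hyz : lexB z y = false := h.1 z hz'
        by_contra hc
        rw [Bool.not_eq_false] at hc
        exact absurd (lexB_trans hc hxy) (by simp [hyz])
    · simp only [PySem.List.insertBy, hxy]
      refine List.Pairwise.cons ?_ (ih h.2)
      intro z hz
      rcases (PySem.List.mem_insertBy _ _ _ _).mp hz with rfl | hz'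
      · simpa using hxy
      · exact h.1 z hz'

theorem sorted2_pairwise_ascending (xs : List (Int × String)) :
    (PySem.List.sorted2 xs (fun x => x.1) (fun x => x.2.toList)).Pairwise
      (fun a b => lexB b a = false) := by
  rw [sorted2_eq_foldl]
  suffices h : ∀ (acc : List (Int × String)), acc.Pairwise (fun a b => lexB b a = false) →
      (xs.foldl (fun acc x => PySem.List.insertBy lexB x acc) acc).Pairwise
        (fun a b => lexB b a = false) by
    exact h [] (by simp)
  induction xs with
  | nil => intro acc hacc; simpa using hacc
  | cons x xs ih => intro acc hacc; exact ih _ (pairwise_insertBy x acc hacc)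

-- rank of `correct` in the descending list = number of tuples strictly greater than (b, correct)
theorem index_eq_count (correct : String) (b : Int) :
    ∀ (R : List (Int × String)), R.Pairwise (fun a c => lexB a c = false) →
      (b, correct) ∈ R → (∀ p ∈ R, p.2 = correct → p.1 ≤ b) →
      PySem.List.index? (R.map (fun x => x.2)) correct =
        some (R.countP (fun p => lexB (b, correct) p)) := by
  intro R
  induction R with
  | nil => intro _ hmem _; simp at hmem
  | cons p R ih =>
    intro hpw hmem hmax
    rw [List.pairwise_cons] at hpw
    by_cases hp : p.2 = correct
    · -- the head is (b, correct) itself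
      have hple : p.1 ≤ b := hmax p (by simp) hp
      have hpeq : p = (b, correct) := by
        rcases lt_or_eq_of_le hple with hlt | heq
        · exfalso
          have hmem' : (b, correct) ∈ R := by
            rcases List.mem_cons.mp hmem with h | h
            · rw [← h] at hlt; simp at hlt
            · exact h
          have hx := hpw.1 _ hmem'
          rw [Bool.eq_false_iff, ne_eq, lexB_iff] at hx
          exact hx (Or.inl hlt)
        · exact Prod.ext heq hp
      subst hpeq
      rw [List.map_cons, PySem.List.index?_cons_self]
      have hcnt : ((b, correct) :: R).countP (fun p => lexB (b, correct) p) = 0 := by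
        rw [List.countP_eq_zero]
        intro q hq
        rcases List.mem_cons.mp hq with rfl | hq'
        · simp [lexB_iff]
        · simpa using hpw.1 q hq'
      rw [hcnt]
    · -- the head is not `correct`, hence ranks strictly ahead of (b, correct)
      have hmem' : (b, correct) ∈ R := by
        rcases List.mem_cons.mp hmem with h | h
        · exact absurd (congrArg Prod.snd h.symm) hp
        · exact h
      have hgt : lexB (b, correct) p = true := by
        have hle := hpw.1 _ hmem'
        rw [Bool.eq_false_iff, ne_eq, lexB_iff] at hle
        simp only [not_or, not_and] at hle
        rw [lexB_iff]
        rcases lt_trichotomy b p.1 with h | h | h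
        · exact Or.inl h
        · refine Or.inr ⟨h, ?_⟩
          rcases lt_trichotomy correct.toList p.2.toList with h2 | h2 | h2
          · exact h2
          · exact absurd (String.toList_inj.mp h2.symm) hp
          · exact absurd h2 (hle.2 h.symm)
        · exact absurd h hle.1
      rw [List.map_cons,
        PySem.List.index?_cons_of_ne _ hp,
        ih hpw.2 hmem' (fun q hq => hmax q (by simp [hq]))]
      simp [hgt]

-- the comprehension over enumerate(resrow) is zip(resrow, names) when names is long enough
theorem enumerate_map_eq_zip (resrow : List Int) (names : List String) :
    ∀ (s : Nat), s + resrow.length ≤ names.length →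
      (PySem.List.enumerate resrow (s : Int)).map
          (fun p => (p.2, PySem.List.pyGetD names p.1 "")) =
        resrow.zip (names.drop s) := by
  induction resrow with
  | nil => intro s _; simp [PySem.List.enumerate_nil]
  | cons v vs ih =>
    intro s hlen
    have hs : s < names.length := by simp at hlen; omega
    rw [PySem.List.enumerate_cons, List.map_cons]
    have h1 : PySem.List.pyGetD names (s : Int) "" = names[s] := by
      rw [PySem.List.pyGetD_natCast]; exact List.getD_eq_getElem names "" hs
    have h2 : ((s : Int) + 1) = ((s + 1 : Nat) : Int) := by push_cast; ring
    rw [h1, h2, ih (s + 1) (by simp at hlen ⊢; omega), List.drop_eq_getElem_cons hs]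
    rfl

-- B's first-pass step function (syntactically the lambda in topn_alt; bridged by rfl)
def bestStep (correct : String) : Option Int → Int × String → Option Int :=
  fun best p =>
    if p.2 == correct && (match best with | none => true | some bv => decide (bv < p.1))
    then some p.1 else best

-- a running best that is already `some` stays `some`
theorem best_some_stays (correct : String) :
    ∀ (pairs : List (Int × String)) (a : Int), ∃ c,
      pairs.foldl (bestStep correct) (some a) = some c := by
  intro pairs
  induction pairs with
  | nil => intro a; exact ⟨a, rfl⟩
  | cons p rest ih =>
    intro a
    rw [List.foldl_cons]
    by_cases hc : (p.2 == correct && decide (a < p.1)) = true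
    · rw [show bestStep correct (some a) p = some p.1 from by simp [bestStep, hc]]
      exact ih p.1
    · rw [show bestStep correct (some a) p = some a from by
        unfold bestStep; rw [if_neg]; simpa using hc]
      exact ih a

-- B's first pass finds nothing iff `correct` never occurs among the paired names
theorem best_foldl_none (correct : String) (pairs : List (Int × String)) :
    pairs.foldl (bestStep correct) none = none ↔ ∀ p ∈ pairs, p.2 ≠ correct := by
  induction pairs with
  | nil => simp
  | cons p rest ih =>
    rw [List.foldl_cons]
    by_cases hc : p.2 = correct
    · obtain ⟨c, hcx⟩ := best_some_stays correct rest p.1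
      rw [show bestStep correct none p = some p.1 from by simp [bestStep, hc], hcx]
      simp [hc]
    · rw [show bestStep correct none p = none from by simp [bestStep, hc], ih]
      simp [hc]

-- B's first pass returns the maximal value attached to `correct`
theorem best_foldl_inv (correct : String) :
    ∀ (pairs : List (Int × String)) (acc : Option Int) (b : Int),
      pairs.foldl (bestStep correct) acc = some b →
      (acc = some b ∨ (b, correct) ∈ pairs) ∧ (∀ p ∈ pairs, p.2 = correct → p.1 ≤ b) ∧
        (∀ a, acc = some a → a ≤ b) := by
  intro pairs
  induction pairs with
  | nil =>
    intro acc b h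
    simp only [List.foldl_nil] at h
    exact ⟨Or.inl h, by simp, fun a ha => by rw [ha] at h; exact le_of_eq (Option.some.inj h)⟩
  | cons p rest ih =>
    intro acc b h
    rw [List.foldl_cons] at h
    cases hacc : acc with
    | none =>
      subst hacc
      by_cases hpc : p.2 = correct
      · rw [show bestStep correct none p = some p.1 from by simp [bestStep, hpc]] at h
        obtain ⟨h1, h2, h3⟩ := ih (some p.1) b h
        have hpb : p.1 ≤ b := h3 p.1 rfl
        refine ⟨?_, ?_, by simp⟩
        · rcases h1 with h1 | h1
          · have hb : b = p.1 := (Option.some.inj h1).symm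
            exact Or.inr (List.mem_cons.mpr (Or.inl (show (b, correct) = p by rw [hb, ← hpc])))
          · exact Or.inr (List.mem_cons.mpr (Or.inr h1))
        · intro q hq hqc
          rcases List.mem_cons.mp hq with rfl | hq'
          · exact hpb
          · exact h2 q hq' hqc
      · rw [show bestStep correct none p = none from by simp [bestStep, hpc]] at h
        obtain ⟨h1, h2, _⟩ := ih none b h
        refine ⟨?_, ?_, by simp⟩
        · rcases h1 with h1 | h1
          · exact absurd h1 (by simp)
          · exact Or.inr (List.mem_cons.mpr (Or.inr h1))
        · intro q hq hqc
          rcases List.mem_cons.mp hq with rfl | hq'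
          · exact absurd hqc hpc
          · exact h2 q hq' hqc
    | some a =>
      subst hacc
      by_cases hcond : (p.2 == correct && decide (a < p.1)) = true
      · rw [show bestStep correct (some a) p = some p.1 from by simp [bestStep, hcond]] at h
        obtain ⟨h1, h2, h3⟩ := ih (some p.1) b h
        have hpb : p.1 ≤ b := h3 p.1 rfl
        have hpc : p.2 = correct := beq_iff_eq.mp ((Bool.and_eq_true _ _).mp hcond).1
        have hlt : a < p.1 := by simpa using ((Bool.and_eq_true _ _).mp hcond).2
        refine ⟨?_, ?_, ?_⟩
        · rcases h1 with h1 | h1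
          · have hb : b = p.1 := (Option.some.inj h1).symm
            exact Or.inr (List.mem_cons.mpr (Or.inl (show (b, correct) = p by rw [hb, ← hpc])))
          · exact Or.inr (List.mem_cons.mpr (Or.inr h1))
        · intro q hq hqc
          rcases List.mem_cons.mp hq with rfl | hq'
          · exact hpb
          · exact h2 q hq' hqc
        · intro a' ha'
          obtain rfl : a = a' := Option.some.inj ha'
          exact le_of_lt (lt_of_lt_of_le hlt hpb)
      · rw [show bestStep correct (some a) p = some a from by
          unfold bestStep; rw [if_neg]; simpa using hcond] at h
        obtain ⟨h1, h2, h3⟩ := ih (some a) b h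
        have hab : a ≤ b := h3 a rfl
        refine ⟨?_, ?_, fun a' ha' => by obtain rfl : a = a' := Option.some.inj ha'; exact hab⟩
        · rcases h1 with h1 | h1
          · exact Or.inl h1
          · exact Or.inr (List.mem_cons.mpr (Or.inr h1))
        · intro q hq hqc
          rcases List.mem_cons.mp hq with rfl | hq'
          · -- the head has the right name but did not replace `some a`: ¬ a < q.1
            have hna : ¬ a < q.1 := by
              intro hlt
              exact hcond (by simp [hqc, hlt])
            exact le_trans (le_of_not_gt hna) hab
          · exact h2 q hq' hqc

-- the two counting predicates agree pointwise
theorem count_pred_eq (correct : String) (b : Int) (p : Int × String) :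
    lexB (b, correct) p =
      decide (b < p.1 ∨ (p.1 = b ∧ correct.toList < p.2.toList)) := by
  by_cases h : b < p.1 ∨ (p.1 = b ∧ correct.toList < p.2.toList)
  · rw [decide_eq_true h]
    rw [lexB_iff]
    rcases h with h | ⟨h1, h2⟩
    · exact Or.inl h
    · exact Or.inr ⟨h1.symm, h2⟩
  · rw [decide_eq_false h]
    rw [← Bool.not_eq_true, lexB_iff]
    intro hc
    rcases hc with hc | ⟨hc1, hc2⟩
    · exact h (Or.inl hc)
    · exact h (Or.inr ⟨hc1.symm, hc2⟩)

-- ===== VERDICT (by name: the statement is the Claim_ definition above) =====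
theorem topn_spec : Claim_equal_topn := by
  intro resrow correct names n _ hpre
  unfold Spec_topn
  simp only [topn, topn_alt]
  have hz : (PySem.List.enumerate resrow).map
      (fun p => (p.2, PySem.List.pyGetD names p.1 "")) = resrow.zip names := by
    have := enumerate_map_eq_zip resrow names 0 (by unfold Pre_topn at hpre; omega)
    simpa using this
  rw [hz]
  set pairs := resrow.zip names with hpairs
  set S := PySem.List.sorted2 pairs (fun x => x.1) (fun x => x.2.toList) with hS
  have hperm : S.reverse.Perm pairs := (List.reverse_perm S).trans (PySem.List.sorted2_perm _ _ _ _)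
  have hpw : S.reverse.Pairwise (fun a c => lexB a c = false) :=
    (List.pairwise_reverse).mpr (sorted2_pairwise_ascending pairs)
  rw [show (fun (best : Option Int) (p : Int × String) =>
      if p.2 == correct && (match best with | none => true | some bv => decide (bv < p.1))
      then some p.1 else best) = bestStep correct from rfl]
  cases hbest : pairs.foldl (bestStep correct) none with
  | none =>
    have hnone : ∀ p ∈ pairs, p.2 ≠ correct := (best_foldl_none correct pairs).mp hbest
    have hnm : PySem.List.index? (S.reverse.map (fun x => x.2)) correct = none := by
      rw [PySem.List.index?_eq_none_iff]
      intro hmem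
      obtain ⟨p, hp, hp2⟩ := List.mem_map.mp hmem
      exact hnone p (hperm.mem_iff.mp hp) hp2
    rw [hnm]
  | some b =>
    obtain ⟨_, h2, _⟩ := best_foldl_inv correct pairs none b hbest
    have hmemp : (b, correct) ∈ pairs := by
      rcases (best_foldl_inv correct pairs none b hbest).1 with h | h
      · exact absurd h (by simp)
      · exact h
    have hidx : PySem.List.index? (S.reverse.map (fun x => x.2)) correct =
        some (S.reverse.countP (fun p => lexB (b, correct) p)) :=
      index_eq_count correct b S.reverse hpw (hperm.mem_iff.mpr hmemp)
        (fun p hp => h2 p (hperm.mem_iff.mp hp))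
    rw [hidx]
    have hcnt : S.reverse.countP (fun p => lexB (b, correct) p) =
        pairs.countP (fun p => decide (b < p.1 ∨ (p.1 = b ∧ correct.toList < p.2.toList))) := by
      rw [hperm.countP_eq]
      exact List.countP_congr (fun p _ => by rw [count_pred_eq])
    rw [hcnt]
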